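-- pv_equiv track=rewrite | github.com/LukeGrahamLandry/Lox | cpp/tests/test.py | parse_test_spec
-- ===== SOURCE A (Python) =====
-- def parse_test_spec(src: list[str]) -> (list[str], bool):
--     expected = []
--     for line in src:
--         comment_start = line.find("//")
--         if comment_start == -1:
--             continue
--
--         out_prefix = "// expect: "
--         err_prefix = ["// expect runtime error:", "// [line", "// // expect runtime error:", "// Error at"]
--         comment = line[comment_start:]
--         if comment.startswith(out_prefix):
--             expected.append(comment[len(out_prefix):].rstrip())
--         else:
--             for err in err_prefix:
--                 if comment.startswith(err):
--                     return [], True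
--
--     return expected, False
-- ===== SOURCE B (Python) =====
-- def parse_test_spec(src):
--     ERR = ("// expect runtime error:", "// [line", "// // expect runtime error:", "// Error at")
--     OUT = "// expect: "
--     comments = [line[line.find("//"):] for line in src if line.find("//") != -1]
--     if any(c.startswith(ERR) for c in comments):
--         return [], True
--     return [c[len(OUT):].rstrip() for c in comments if c.startswith(OUT)], False
-- ===== Notes on version B (the rewrite author's own statement) =====
-- stated objective: simpler
-- what changed: Replaces the single stateful loop with early return by a declarative two-phase form: extract all comments once, answer ([],True) if any carries an error prefix, otherwise collect the expect lines with a comprehension.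
import Mathlib
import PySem

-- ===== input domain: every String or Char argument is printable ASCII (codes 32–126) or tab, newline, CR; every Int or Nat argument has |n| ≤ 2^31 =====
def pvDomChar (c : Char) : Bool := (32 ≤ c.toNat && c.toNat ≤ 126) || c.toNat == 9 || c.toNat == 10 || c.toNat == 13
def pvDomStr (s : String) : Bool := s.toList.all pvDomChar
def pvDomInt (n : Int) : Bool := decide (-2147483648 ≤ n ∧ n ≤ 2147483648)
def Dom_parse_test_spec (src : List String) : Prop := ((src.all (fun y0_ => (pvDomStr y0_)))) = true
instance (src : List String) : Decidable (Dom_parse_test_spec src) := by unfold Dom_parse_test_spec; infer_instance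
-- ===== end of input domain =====

-- B is a declarative two-phase rewrite of A's stateful early-return loop; objective: simpler.

-- ===== PORT A =====
def pvErrPrefixes : List String :=
  ["// expect runtime error:", "// [line", "// // expect runtime error:", "// Error at"]

def parse_test_spec_go : List String → List String → List String × Bool
  | [], expected => (expected, false)
  | line :: rest, expected =>
    let comment_start := PySem.Str.find line "//"
    if comment_start = -1 then parse_test_spec_go rest expected
    else
      let comment := PySem.Str.slice line (some comment_start) none
      if PySem.Str.startswith comment "// expect: " then
        parse_test_spec_go rest
          (expected ++ [PySem.Str.rstrip (PySem.Str.slice comment (some 11) none)])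
      else
        -- inner 'for err in err_prefix: if comment.startswith(err): return [], True'
        if pvErrPrefixes.any (fun err => PySem.Str.startswith comment err) then ([], true)
        else parse_test_spec_go rest expected

def parse_test_spec (src : List String) : List String × Bool :=
  parse_test_spec_go src []

-- ===== PORT B =====
-- comment of a line: line[line.find("//"):] when find ≠ -1
def pvComment? (line : String) : Option String :=
  let c := PySem.Str.find line "//"
  if c = -1 then none else some (PySem.Str.slice line (some c) none)

def pvIsErr (c : String) : Bool :=
  pvErrPrefixes.any (fun err => PySem.Str.startswith c err)

def parse_test_spec_alt (src : List String) : List String × Bool :=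
  let comments := src.filterMap pvComment?
  if comments.any pvIsErr then ([], true)
  else
    ((comments.filter (fun c => PySem.Str.startswith c "// expect: ")).map
      (fun c => PySem.Str.rstrip (PySem.Str.slice c (some 11) none)), false)

-- ===== PRECONDITION & SPEC =====
def Spec_parse_test_spec (src : List String) (out : List String × Bool) : Prop := out = parse_test_spec_alt src
instance (src : List String) (out : List String × Bool) : Decidable (Spec_parse_test_spec src out) := by unfold Spec_parse_test_spec; infer_instance

-- ===== CLAIM (what is proved, stated in full; the proofs are below) =====
def Claim_equal_parse_test_spec : Prop := ∀ (src : List String), Dom_parse_test_spec src → Spec_parse_test_spec src (parse_test_spec src)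

-- ===== LEMMAS AND PROOFS =====

-- an '// expect: ' comment never also carries one of the error prefixes
lemma out_not_err (c : String) (h : PySem.Str.startswith c "// expect: " = true) :
    pvIsErr c = false := by
  have h' : ("// expect: ").toList <+: c.toList := by
    simpa [PySem.Chars.startswith_iff] using h
  have k : ∀ e ∈ pvErrPrefixes, PySem.Str.startswith c e = false := by
    intro e he
    rw [PySem.Str.startswith_eq, ← Bool.not_eq_true, PySem.Chars.startswith_iff]
    fin_cases he <;>
      · intro hp
        rcases List.prefix_or_prefix_of_prefix hp h' with q | q <;> revert q <;> decide
  unfold pvIsErr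
  rw [List.any_eq_false]
  intro e he
  simpa using k e he

lemma go_eq (src : List String) : ∀ expected,
    parse_test_spec_go src expected =
      if (src.filterMap pvComment?).any pvIsErr then ([], true)
      else (expected ++ ((src.filterMap pvComment?).filter
              (fun c => PySem.Str.startswith c "// expect: ")).map
              (fun c => PySem.Str.rstrip (PySem.Str.slice c (some 11) none)), false) := by
  induction src with
  | nil => intro expected; simp [parse_test_spec_go]
  | cons line rest ih =>
    intro expected
    show (if PySem.Str.find line "//" = -1 then parse_test_spec_go rest expected
          else _) = _
    by_cases hc : PySem.Str.find line "//" = -1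
    · have hnone : pvComment? line = none := by unfold pvComment?; rw [if_pos hc]
      rw [if_pos hc, List.filterMap_cons_none hnone, ih]
    · have hsome : pvComment? line
          = some (PySem.Str.slice line (some (PySem.Str.find line "//")) none) := by
        unfold pvComment?; rw [if_neg hc]
      rw [if_neg hc, List.filterMap_cons_some hsome, List.any_cons]
      set cm := PySem.Str.slice line (some (PySem.Str.find line "//")) none with hcm
      by_cases hout : PySem.Str.startswith cm "// expect: " = true
      · have herr := out_not_err cm hout
        rw [if_pos hout, ih, herr, Bool.false_or,
            List.filter_cons_of_pos (by simpa using hout), List.map_cons]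
        split_ifs with hrest
        · rfl
        · simp
      · have hout' : PySem.Str.startswith cm "// expect: " = false := by
          simpa using hout
        rw [if_neg hout, List.filter_cons_of_neg (by simpa using hout')]
        by_cases herr : pvErrPrefixes.any (fun err => PySem.Str.startswith cm err) = true
        · have h1 : pvIsErr cm = true := herr
          rw [if_pos herr, h1, Bool.true_or, if_pos rfl]
        · simp only [Bool.not_eq_true] at herr
          have h1 : pvIsErr cm = false := herr
          rw [if_neg (by rw [herr]; exact Bool.false_ne_true), ih, h1, Bool.false_or]

-- ===== VERDICT (by name: the statement is the Claim_ definition above) =====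
theorem parse_test_spec_spec : Claim_equal_parse_test_spec := by
  intro src _
  unfold Spec_parse_test_spec parse_test_spec parse_test_spec_alt
  rw [go_eq]
  simp
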